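-- pv_equiv track=rewrite | github.com/HanatoK/miscellaneous_scripts | MFPT/count_transitions.py | direct_find
-- ===== SOURCE A (Python) =====
-- def direct_find(s: str, start, end):
--     ids = []
--     current_start = None
--     current_end = None
--     for i, ch in enumerate(s):
--         if ch == start and current_start is None:
--             current_start = i
--         if ch == end and current_end is None and current_start is not None:
--             current_end = i
--         if current_start is not None and current_end is not None:
--             ids.append((current_start, current_end+1))
--             current_start = None
--             current_end = None
--     return ids
-- ===== SOURCE B (Python) =====
-- def direct_find(s: str, start, end):
--     start_ids = [i for i, ch in enumerate(s) if ch == start]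
--     end_ids = [i for i, ch in enumerate(s) if ch == end]
--     res = []
--     j = 0
--     last = -1
--     for i in start_ids:
--         if i <= last:
--             continue
--         while j < len(end_ids) and end_ids[j] < i:
--             j += 1
--         if j == len(end_ids):
--             break
--         e = end_ids[j]
--         res.append((i, e + 1))
--         last = e
--         j += 1
--     return res
-- ===== Notes on version B (the rewrite author's own statement) =====
-- stated objective: alternative
-- what changed: Replaces A's single-pass two-optional-flags state machine with two precomputed match-index lists merged by a two-pointer pass (skip starts <= last consumed end, advance the end pointer to the first end >= start).
import Mathlib
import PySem

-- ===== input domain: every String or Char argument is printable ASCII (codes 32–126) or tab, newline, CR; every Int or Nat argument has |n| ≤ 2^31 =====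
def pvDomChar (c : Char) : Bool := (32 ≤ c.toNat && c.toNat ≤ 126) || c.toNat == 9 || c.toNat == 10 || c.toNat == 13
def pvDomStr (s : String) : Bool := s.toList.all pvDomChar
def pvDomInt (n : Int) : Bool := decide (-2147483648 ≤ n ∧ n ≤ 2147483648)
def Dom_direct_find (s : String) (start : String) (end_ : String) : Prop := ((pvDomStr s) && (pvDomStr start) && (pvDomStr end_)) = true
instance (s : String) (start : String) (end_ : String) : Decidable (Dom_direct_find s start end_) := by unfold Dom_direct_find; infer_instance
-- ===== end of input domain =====

-- B builds the start/end match-index lists up front and pairs them with a two-pointer merge,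
-- instead of A's single-pass optional-flag state machine (objective: alternative decomposition).

-- ===== PORT A =====
-- literal transliteration of A's for-loop: state = (ids, current_start, current_end);
-- 'ch == start' (char vs possibly multi-char string) is [ch] = start.toList
-- the loop body of A (named so the proofs can state step equations about it)
def stepA (S E : List Char) (st : List (Int × Int) × Option Int × Option Int)
    (p : Int × Char) : List (Int × Int) × Option Int × Option Int :=
  let cs := if S = [p.2] ∧ st.2.1 = none then some p.1 else st.2.1
  let ce := if E = [p.2] ∧ st.2.2 = none ∧ cs ≠ none then some p.1 else st.2.2
  match cs, ce with
  | some a, some b => (st.1 ++ [(a, b + 1)], none, none)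
  | cs, ce => (st.1, cs, ce)

def direct_find (s : String) (start : String) (end_ : String) : List (Int × Int) :=
  ((PySem.List.enumerate s.toList).foldl (stepA start.toList end_.toList) ([], none, none)).1

-- ===== PORT B =====
-- transliteration of Source B's merge loop: the end-pointer j becomes the suffix 'ends',
-- the inner 'while end_ids[j] < i: j += 1' becomes dropWhile
def mergeB : List Int → List Int → Int → List (Int × Int)
  | [], _, _ => []
  | i :: ss, ends, last =>
    if i ≤ last then mergeB ss ends last
    else
      match ends.dropWhile (fun e => decide (e < i)) with
      | [] => []
      | e :: es => (i, e + 1) :: mergeB ss es e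

def direct_find_alt (s : String) (start : String) (end_ : String) : List (Int × Int) :=
  let start_ids := (PySem.List.enumerate s.toList).filterMap
    (fun p => if start.toList = [p.2] then some p.1 else none)
  let end_ids := (PySem.List.enumerate s.toList).filterMap
    (fun p => if end_.toList = [p.2] then some p.1 else none)
  mergeB start_ids end_ids (-1)

-- ===== PRECONDITION & SPEC =====
def Spec_direct_find (s : String) (start : String) (end_ : String) (out : List (Int × Int)) : Prop := out = direct_find_alt s start end_
instance (s : String) (start : String) (end_ : String) (out : List (Int × Int)) : Decidable (Spec_direct_find s start end_ out) := by unfold Spec_direct_find; infer_instance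

-- ===== CLAIM (what is proved, stated in full; the proofs are below) =====
def Claim_equal_direct_find : Prop := ∀ (s : String) (start : String) (end_ : String), Dom_direct_find s start end_ → Spec_direct_find s start end_ (direct_find s start end_)

-- ===== LEMMAS AND PROOFS =====

-- common specification: the interval scan as a recursive function
def scan (S E : List Char) : Option Int → List (Int × Char) → List (Int × Int)
  | _, [] => []
  | none, (i, ch) :: t =>
      if S = [ch] then
        if E = [ch] then (i, i + 1) :: scan S E none t else scan S E (some i) t
      else scan S E none t
  | some a, (i, ch) :: t =>
      if E = [ch] then (a, i + 1) :: scan S E none t else scan S E (some a) t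

def sIds (S : List Char) (l : List (Int × Char)) : List Int :=
  l.filterMap (fun p => if S = [p.2] then some p.1 else none)

-- strictly increasing indices, all above a bound
def Incr : Int → List (Int × Char) → Prop
  | _, [] => True
  | b, (i, _) :: t => b < i ∧ Incr i t

theorem Incr_mono {a b : Int} {l : List (Int × Char)} (h : a ≤ b) (hl : Incr b l) : Incr a l := by
  cases l with
  | nil => trivial
  | cons p t => exact ⟨lt_of_le_of_lt h hl.1, hl.2⟩

theorem Incr_lt_of_mem {b : Int} {l : List (Int × Char)} (hl : Incr b l) {p : Int × Char}
    (hp : p ∈ l) : b < p.1 := by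
  induction l generalizing b with
  | nil => cases hp
  | cons q t ih =>
    rcases List.mem_cons.1 hp with h | h
    · exact h ▸ hl.1
    · exact lt_trans hl.1 (ih hl.2 h)

theorem lt_of_mem_sIds {S : List Char} {b : Int} {l : List (Int × Char)} (hl : Incr b l)
    {e : Int} (he : e ∈ sIds S l) : b < e := by
  rcases List.mem_filterMap.1 he with ⟨p, hp, hpe⟩
  have : p.1 = e := by
    by_cases h : S = [p.2] <;> simp [h] at hpe
    exact hpe
  exact this ▸ Incr_lt_of_mem hl hp

-- a leading end index below every remaining start index is dropped by mergeB's dropWhile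
theorem sIds_cons (S : List Char) (i : Int) (ch : Char) (t : List (Int × Char)) :
    sIds S ((i, ch) :: t) = if S = [ch] then i :: sIds S t else sIds S t := by
  by_cases h : S = [ch] <;> simp [sIds, List.filterMap_cons, h]

-- a leading end index below every remaining start index is dropped by mergeB's dropWhile
theorem mergeB_drop_head : ∀ (ss ends : List Int) (i last : Int),
    (∀ s ∈ ss, i < s) → mergeB ss (i :: ends) last = mergeB ss ends last := by
  intro ss
  induction ss with
  | nil => intro ends i last _; rfl
  | cons s ss ih =>
    intro ends i last h
    have hi : i < s := h s (List.mem_cons_self ..)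
    by_cases hle : s ≤ last
    · simp only [mergeB, if_pos hle]
      exact ih ends i last (fun x hx => h x (List.mem_cons_of_mem _ hx))
    · simp [mergeB, hle, hi]

theorem dropWhile_lt_eq_self {b : Int} {S : List Char} {l : List (Int × Char)} (hl : Incr b l) :
    (sIds S l).dropWhile (fun e => decide (e < b)) = sIds S l := by
  cases h : sIds S l with
  | nil => rfl
  | cons e es =>
    have : b < e := lt_of_mem_sIds hl (h ▸ List.mem_cons_self ..)
    simp [not_lt_of_gt this]

-- the heart: B's merge computes the scan, in both scan states
theorem merge_eq_scan (S E : List Char) (l : List (Int × Char)) :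
    (∀ last, Incr last l → mergeB (sIds S l) (sIds E l) last = scan S E none l) ∧
    (∀ a, Incr a l →
      (match sIds E l with
       | [] => ([] : List (Int × Int))
       | e :: es => (a, e + 1) :: mergeB (sIds S l) es e) = scan S E (some a) l) := by
  induction l with
  | nil => constructor <;> intro _ _ <;> simp [sIds, scan, mergeB]
  | cons p t ih =>
    obtain ⟨i, ch⟩ := p
    constructor
    · intro last hl
      obtain ⟨hlt, ht⟩ := hl
      by_cases hS : S = [ch]
      · by_cases hE : E = [ch]
        · -- start and end match at i: emit (i, i+1)
          rw [sIds_cons, sIds_cons, if_pos hS, if_pos hE]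
          simp only [scan]
          rw [if_pos hS, if_pos hE]
          simp only [mergeB, if_neg (by omega : ¬ i ≤ last), List.dropWhile_cons]
          rw [if_neg (by simp)]
          show (i, i + 1) :: mergeB (sIds S t) (sIds E t) i = _
          exact congrArg _ (ih.1 i ht)
        · -- start matches, end does not: move to state (some i)
          rw [sIds_cons, sIds_cons, if_pos hS, if_neg hE]
          simp only [scan]
          rw [if_pos hS, if_neg hE]
          simp only [mergeB, if_neg (by omega : ¬ i ≤ last)]
          rw [dropWhile_lt_eq_self ht]
          exact ih.2 i ht
      · rw [sIds_cons, sIds_cons, if_neg hS]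
        by_cases hE : E = [ch]
        · -- spurious leading end below every start of t
          rw [if_pos hE]
          simp only [scan]
          rw [if_neg hS]
          rw [mergeB_drop_head _ _ _ _ (fun s hs => lt_of_mem_sIds ht hs)]
          exact ih.1 last (Incr_mono (le_of_lt hlt) ht)
        · rw [if_neg hE]
          simp only [scan]
          rw [if_neg hS]
          exact ih.1 last (Incr_mono (le_of_lt hlt) ht)
    · intro a hl
      obtain ⟨hlt, ht⟩ := hl
      rw [sIds_cons, sIds_cons]
      by_cases hE : E = [ch]
      · rw [if_pos hE]
        simp only [scan]
        rw [if_pos hE]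
        by_cases hS : S = [ch]
        · -- i is both a start and the end closing a: the new start i is skipped (i ≤ i)
          rw [if_pos hS]
          simp only [mergeB, if_pos (le_refl i)]
          exact congrArg _ (ih.1 i ht)
        · rw [if_neg hS]
          exact congrArg _ (ih.1 i ht)
      · rw [if_neg hE]
        simp only [scan]
        rw [if_neg hE]
        have hQ := ih.2 a (Incr_mono (le_of_lt hlt) ht)
        by_cases hS : S = [ch]
        · -- i is a start inside the open interval: skipped because i < e for the closing end e
          rw [if_pos hS, ← hQ]
          cases hEids : sIds E t with
          | nil => rfl
          | cons e es =>
            have hie : i < e := lt_of_mem_sIds ht (hEids ▸ List.mem_cons_self ..)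
            simp only [mergeB, if_pos (le_of_lt hie)]
        · rw [if_neg hS, ← hQ]

theorem Incr_enumerate (xs : List Char) (k b : Int) (h : b < k) :
    Incr b (PySem.List.enumerate xs k) := by
  induction xs generalizing k b with
  | nil => simp [PySem.List.enumerate_nil, Incr]
  | cons x xs ih => simpa [PySem.List.enumerate_cons, Incr] using ⟨h, ih (k + 1) k (by omega)⟩

-- A's fold computes the scan, in both reachable states
theorem fold_eq_scan (S E : List Char) (l : List (Int × Char)) :
    ∀ (ids : List (Int × Int)) (st : Option Int),
    (l.foldl (stepA S E) (ids, st, none)).1 = ids ++ scan S E st l := by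
  induction l with
  | nil => intro ids st; simp [scan]
  | cons p t ih =>
    intro ids st
    obtain ⟨i, ch⟩ := p
    cases st with
    | none =>
      by_cases hS : S = [ch]
      · by_cases hE : E = [ch]
        · have hstep : stepA S E (ids, none, none) (i, ch) = (ids ++ [(i, i + 1)], none, none) := by
            simp [stepA, hS, hE]
          rw [List.foldl_cons, hstep, ih]
          simp only [scan]
          rw [if_pos hS, if_pos hE, List.append_assoc, List.singleton_append]
        · have hstep : stepA S E (ids, none, none) (i, ch) = (ids, some i, none) := by
            simp [stepA, hS, hE]
          rw [List.foldl_cons, hstep, ih]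
          simp only [scan]
          rw [if_pos hS, if_neg hE]
      · have hstep : stepA S E (ids, none, none) (i, ch) = (ids, none, none) := by
          simp [stepA, hS]
        rw [List.foldl_cons, hstep, ih]
        simp only [scan]
        rw [if_neg hS]
    | some a =>
      by_cases hE : E = [ch]
      · have hstep : stepA S E (ids, some a, none) (i, ch) = (ids ++ [(a, i + 1)], none, none) := by
          simp [stepA, hE]
        rw [List.foldl_cons, hstep, ih]
        simp only [scan]
        rw [if_pos hE, List.append_assoc, List.singleton_append]
      · have hstep : stepA S E (ids, some a, none) (i, ch) = (ids, some a, none) := by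
          simp [stepA, hE]
        rw [List.foldl_cons, hstep, ih]
        simp only [scan]
        rw [if_neg hE]

-- ===== VERDICT (by name: the statement is the Claim_ definition above) =====
theorem direct_find_spec : Claim_equal_direct_find := by
  intro s start end_ _
  show direct_find s start end_ = direct_find_alt s start end_
  have hA := fold_eq_scan start.toList end_.toList (PySem.List.enumerate s.toList) [] none
  have hB := (merge_eq_scan start.toList end_.toList (PySem.List.enumerate s.toList)).1 (-1)
    (Incr_enumerate s.toList 0 (-1) (by omega))
  simp only [direct_find, direct_find_alt]
  rw [hA]
  simp only [sIds] at hB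
  rw [hB]
  simp
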